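-- pv_equiv track=rewrite | github.com/deeflect/dory | src/dory_core/wake.py | _extract_privacy_boundary_lines
-- ===== SOURCE A (Python) =====
-- def _extract_privacy_boundary_lines(content: str) -> list[str]:
--     lines: list[str] = []
--     in_frontmatter = False
--     in_boundary_section = False
--     for index, raw_line in enumerate(content.splitlines()):
--         line = raw_line.strip()
--         lowered = line.casefold()
--         if index == 0 and line == "---":
--             in_frontmatter = True
--             continue
--         if in_frontmatter:
--             if line == "---":
--                 in_frontmatter = False
--             continue
--         if not line:
--             continue
--         if line.startswith("#"):
--             in_boundary_section = any(
--                 marker in lowered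
--                 for marker in (
--                     "boundar",
--                     "private",
--                     "privacy",
--                     "sensitive",
--                     "public",
--                     "redact",
--                     "do not",
--                     "don't",
--                     "avoid",
--                 )
--             )
--             if in_boundary_section:
--                 lines.append(line)
--             continue
--         if not (in_boundary_section or _line_mentions_privacy_boundary(lowered)):
--             continue
--         if _line_looks_like_personal_identifier(lowered):
--             continue
--         lines.append(raw_line.rstrip())
--     return lines
--
-- def _line_mentions_privacy_boundary(lowered_line: str) -> bool:
--     return any(
--         marker in lowered_line
--         for marker in (
--             "boundary",
--             "boundaries",
--             "private",
--             "privacy",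
--             "sensitive",
--             "redact",
--             "do not mention",
--             "don't mention",
--             "do not share",
--             "avoid sharing",
--             "public-safe",
--             "public safe",
--         )
--     )
--
-- def _line_looks_like_personal_identifier(lowered_line: str) -> bool:
--     return any(
--         marker in lowered_line
--         for marker in (
--             "telegram",
--             "email",
--             "phone",
--             "dob",
--             "birth",
--             "birthday",
--             "passport",
--             "ssn",
--             "address",
--             "orcid",
--         )
--     )
-- ===== SOURCE B (Python) =====
-- _HEADING_MARKERS = (
--     "boundar", "private", "privacy", "sensitive", "public",
--     "redact", "do not", "don't", "avoid",
-- )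
--
-- _MENTION_MARKERS = (
--     "boundary", "boundaries", "private", "privacy", "sensitive", "redact",
--     "do not mention", "don't mention", "do not share", "avoid sharing",
--     "public-safe", "public safe",
-- )
--
-- _IDENTIFIER_MARKERS = (
--     "telegram", "email", "phone", "dob", "birth", "birthday",
--     "passport", "ssn", "address", "orcid",
-- )
--
--
-- def _strip_frontmatter(lines):
--     """Drop a leading '---' front-matter block (everything, if never closed)."""
--     if lines and lines[0].strip() == "---":
--         for i in range(1, len(lines)):
--             if lines[i].strip() == "---":
--                 return lines[i + 1:]
--         return []
--     return lines
--
--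
-- def _split_sections(lines):
--     """Group blank-free lines into (heading, body) sections; the document
--     preamble before the first heading gets heading None."""
--     sections = [[None, []]]
--     for raw in lines:
--         if raw.strip().startswith("#"):
--             sections.append([raw.strip(), []])
--         else:
--             sections[-1][1].append(raw)
--     return sections
--
--
-- def _keep(flag, raw):
--     low = raw.strip().casefold()
--     return ((flag or any(m in low for m in _MENTION_MARKERS))
--             and not any(m in low for m in _IDENTIFIER_MARKERS))
--
--
-- def _process_section(heading, body):
--     flag = heading is not None and any(
--         m in heading.casefold() for m in _HEADING_MARKERS)
--     head = [heading] if flag else []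
--     return head + [raw.rstrip() for raw in body if _keep(flag, raw)]
--
--
-- def _extract_privacy_boundary_lines(content: str) -> list[str]:
--     body = _strip_frontmatter(content.splitlines())
--     nonblank = [l for l in body if l.strip()]
--     return [out
--             for heading, sec in _split_sections(nonblank)
--             for out in _process_section(heading, sec)]
-- ===== Notes on version B (the rewrite author's own statement) =====
-- stated objective: alternative
-- what changed: Replaces A's single flag-carrying enumerate loop by a staged pipeline: strip front matter, drop blank lines, group the remainder into (heading, body) sections, then flat-map a per-section processor whose boundary flag is a pure function of the section heading.
import Mathlib
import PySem

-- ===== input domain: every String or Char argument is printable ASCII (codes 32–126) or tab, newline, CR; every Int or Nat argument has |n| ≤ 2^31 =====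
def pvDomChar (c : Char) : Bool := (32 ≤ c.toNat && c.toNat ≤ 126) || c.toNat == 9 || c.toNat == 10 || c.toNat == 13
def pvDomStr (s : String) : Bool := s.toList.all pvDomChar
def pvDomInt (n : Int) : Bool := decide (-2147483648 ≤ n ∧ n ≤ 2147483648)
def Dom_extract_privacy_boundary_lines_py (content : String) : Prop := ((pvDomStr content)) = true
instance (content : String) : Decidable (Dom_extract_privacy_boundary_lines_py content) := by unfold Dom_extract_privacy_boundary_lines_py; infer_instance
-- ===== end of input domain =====

-- B replaces A's single flag-carrying enumerate loop by a staged pipeline — strip front matter,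
-- drop blanks, group into (heading, body) sections, flat-map a per-section processor — same
-- values, genuinely different decomposition (objective: alternative).


-- shared module-level marker tuples (identical module constants in A and B)
def pvHeadMarkers : List String :=
  ["boundar", "private", "privacy", "sensitive", "public", "redact", "do not", "don't", "avoid"]
def pvMentionMarkers : List String :=
  ["boundary", "boundaries", "private", "privacy", "sensitive", "redact",
   "do not mention", "don't mention", "do not share", "avoid sharing", "public-safe", "public safe"]
def pvIdMarkers : List String :=
  ["telegram", "email", "phone", "dob", "birth", "birthday", "passport", "ssn", "address", "orcid"]

def line_mentions_privacy_boundary (lowered : String) : Bool :=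
  pvMentionMarkers.any (fun m => PySem.Str.isIn m lowered)
def line_looks_like_personal_identifier (lowered : String) : Bool :=
  pvIdMarkers.any (fun m => PySem.Str.isIn m lowered)

-- ===== PORT A =====
-- A's enumerate loop, index carried explicitly; str.casefold = PySem.Str.lower (exact on the ASCII domain)
def pvLoopA : List String → Nat → Bool → Bool → List String → List String
  | [], _, _, _, acc => acc
  | raw :: rest, idx, fm, bs, acc =>
    let line := PySem.Str.strip raw
    let lowered := PySem.Str.lower line
    if idx = 0 ∧ line = "---" then pvLoopA rest (idx+1) true bs acc
    else if fm then
      if line = "---" then pvLoopA rest (idx+1) false bs acc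
      else pvLoopA rest (idx+1) fm bs acc
    else if line = "" then pvLoopA rest (idx+1) fm bs acc
    else if PySem.Str.startswith line "#" then
      let bs' := pvHeadMarkers.any (fun m => PySem.Str.isIn m lowered)
      pvLoopA rest (idx+1) fm bs' (if bs' then acc ++ [line] else acc)
    else if !(bs || line_mentions_privacy_boundary lowered) then pvLoopA rest (idx+1) fm bs acc
    else if line_looks_like_personal_identifier lowered then pvLoopA rest (idx+1) fm bs acc
    else pvLoopA rest (idx+1) fm bs (acc ++ [PySem.Str.rstrip raw])

def extract_privacy_boundary_lines_py (content : String) : List String :=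
  pvLoopA (PySem.Str.splitlines content) 0 false false []

-- ===== PORT B =====
-- Source B's _strip_frontmatter: the for-range scan for the closing fence as structural recursion
def pvFindClose : List String → List String
  | [] => []
  | l :: rest => if PySem.Str.strip l = "---" then rest else pvFindClose rest

def pvStripFrontmatter : List String → List String
  | [] => []
  | first :: rest => if PySem.Str.strip first = "---" then pvFindClose rest else first :: rest

-- Source B's _split_sections: append a new section on a heading, otherwise extend the last body
def pvAddToLast : List (Option String × List String) → String → List (Option String × List String)
  | [], _ => []
  | [(h, b)], l => [(h, b ++ [l])]
  | s :: ss, l => s :: pvAddToLast ss l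

def pvSecStep (ss : List (Option String × List String)) (raw : String) :
    List (Option String × List String) :=
  if PySem.Str.startswith (PySem.Str.strip raw) "#"
  then ss ++ [(some (PySem.Str.strip raw), [])]
  else pvAddToLast ss raw

def pvSections (ls : List String) : List (Option String × List String) :=
  ls.foldl pvSecStep [(none, [])]

-- Source B's _keep / _process_section
def pvSecFlag : Option String → Bool
  | none => false
  | some h => pvHeadMarkers.any (fun m => PySem.Str.isIn m (PySem.Str.lower h))

def pvKeep (flag : Bool) (raw : String) : Bool :=
  let low := PySem.Str.lower (PySem.Str.strip raw)
  (flag || line_mentions_privacy_boundary low) && !(line_looks_like_personal_identifier low)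

def pvProcSection (s : Option String × List String) : List String :=
  let flag := pvSecFlag s.1
  (match s.1 with
   | some h => if flag then [h] else []
   | none => []) ++ (s.2.filter (pvKeep flag)).map PySem.Str.rstrip

def extract_privacy_boundary_lines_py_alt (content : String) : List String :=
  (pvSections (((pvStripFrontmatter (PySem.Str.splitlines content))).filter
      (fun l => PySem.Str.strip l ≠ ""))).flatMap pvProcSection

-- ===== PRECONDITION & SPEC =====
def Spec_extract_privacy_boundary_lines_py (content : String) (out : List String) : Prop := out = extract_privacy_boundary_lines_py_alt content
instance (content : String) (out : List String) : Decidable (Spec_extract_privacy_boundary_lines_py content out) := by unfold Spec_extract_privacy_boundary_lines_py; infer_instance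

-- ===== CLAIM (what is proved, stated in full; the proofs are below) =====
def Claim_equal_extract_privacy_boundary_lines_py : Prop := ∀ (content : String), Dom_extract_privacy_boundary_lines_py content → Spec_extract_privacy_boundary_lines_py content (extract_privacy_boundary_lines_py content)

-- ===== LEMMAS AND PROOFS =====

-- proof-only reference loop: the section-flag pass over the (front-matter-free) lines
def pvRef : List String → Bool → List String
  | [], _ => []
  | raw :: rest, bs =>
    let line := PySem.Str.strip raw
    if line = "" then pvRef rest bs
    else
      let lowered := PySem.Str.lower line
      if PySem.Str.startswith line "#" then
        let bs' := pvHeadMarkers.any (fun m => PySem.Str.isIn m lowered)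
        (if bs' then [line] else []) ++ pvRef rest bs'
      else if (bs || line_mentions_privacy_boundary lowered)
              && !(line_looks_like_personal_identifier lowered) then
        PySem.Str.rstrip raw :: pvRef rest bs
      else pvRef rest bs

-- ---- A-side: A's loop equals pvRef after the front matter ----

theorem pvLoopA_idx_irrel (ls : List String) : ∀ (i j : Nat) (fm bs : Bool) (acc : List String),
    i ≠ 0 → j ≠ 0 → pvLoopA ls i fm bs acc = pvLoopA ls j fm bs acc := by
  induction ls with
  | nil => intros; rfl
  | cons raw rest ih =>
    intro i j fm bs acc hi hj
    simp only [pvLoopA, hi, hj, false_and, if_false]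
    split_ifs <;> exact ih _ _ _ _ _ (Nat.succ_ne_zero i) (Nat.succ_ne_zero j)

theorem pvLoopA_fm (ls : List String) : ∀ (i : Nat) (bs : Bool) (acc : List String), i ≠ 0 →
    pvLoopA ls i true bs acc = pvLoopA (pvFindClose ls) 1 false bs acc := by
  induction ls with
  | nil => intros; rfl
  | cons raw rest ih =>
    intro i bs acc hi
    simp only [pvLoopA, pvFindClose, hi, false_and, if_false, if_true]
    split_ifs with h
    · exact pvLoopA_idx_irrel rest _ 1 _ _ _ (Nat.succ_ne_zero i) one_ne_zero
    · exact ih _ _ _ (Nat.succ_ne_zero i)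

theorem pvLoopA_main (ls : List String) : ∀ (i : Nat) (bs : Bool) (acc : List String), i ≠ 0 →
    pvLoopA ls i false bs acc = acc ++ pvRef ls bs := by
  induction ls with
  | nil => intros; simp [pvLoopA, pvRef]
  | cons raw rest ih =>
    intro i bs acc hi
    simp only [pvLoopA, pvRef, hi, false_and, if_false, Bool.false_eq_true]
    by_cases hempty : PySem.Str.strip raw = ""
    · simp only [hempty, if_true]
      exact ih _ _ _ (Nat.succ_ne_zero i)
    · simp only [hempty, if_false]
      by_cases hhash : PySem.Str.startswith (PySem.Str.strip raw) "#" = true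
      · simp only [hhash, if_true]
        rw [ih _ _ _ (Nat.succ_ne_zero i)]
        split_ifs <;> simp
      · simp only [hhash]
        by_cases hrel : (bs || line_mentions_privacy_boundary (PySem.Str.lower (PySem.Str.strip raw))) = true
        · by_cases hid : line_looks_like_personal_identifier (PySem.Str.lower (PySem.Str.strip raw)) = true
          · simp only [hrel, hid]
            exact ih _ _ _ (Nat.succ_ne_zero i)
          · simp only [Bool.not_eq_true] at hid
            simp [hrel, hid]
            rw [ih _ _ _ (Nat.succ_ne_zero i)]
            simp
        · simp only [Bool.or_eq_true, not_or, Bool.not_eq_true] at hrel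
          obtain ⟨hb, hm⟩ := hrel
          subst hb
          simp only [hm, Bool.false_or, Bool.not_false, if_true, Bool.false_and,
            Bool.false_eq_true, if_false]
          exact ih _ _ _ (Nat.succ_ne_zero i)

theorem pvLoopA_zero_step (raw : String) (rest : List String) (bs : Bool) (acc : List String)
    (h : PySem.Str.strip raw ≠ "---") :
    pvLoopA (raw :: rest) 0 false bs acc = pvLoopA (raw :: rest) 1 false bs acc := by
  simp only [pvLoopA, h, and_false, if_false, one_ne_zero, Bool.false_eq_true]
  split_ifs <;> exact pvLoopA_idx_irrel rest _ _ _ _ _ one_ne_zero (by omega)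

-- ---- B-side: the section pipeline equals pvRef ----

theorem pvAddToLast_ne_nil (ss : List (Option String × List String)) (l : String)
    (h : ss ≠ []) : pvAddToLast ss l ≠ [] := by
  match ss with
  | [(a, b)] => simp [pvAddToLast]
  | s :: s' :: rest => simp [pvAddToLast]

theorem pvFold_cons (ls : List String) :
    ∀ (s : Option String × List String) (ss : List (Option String × List String)), ss ≠ [] →
    ls.foldl pvSecStep (s :: ss) = s :: ls.foldl pvSecStep ss := by
  induction ls with
  | nil => intros; rfl
  | cons raw rest ih =>
    intro s ss hss
    simp only [List.foldl_cons, pvSecStep]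
    split_ifs with h
    · rw [List.cons_append, ih _ _ (by simp)]
    · have : pvAddToLast (s :: ss) raw = s :: pvAddToLast ss raw := by
        match ss with
        | x :: xs => simp [pvAddToLast]
      rw [this, ih _ _ (pvAddToLast_ne_nil ss raw hss)]

theorem pvRef_sections (ls : List String) :
    ∀ (h : Option String) (b : List String), (∀ l ∈ ls, PySem.Str.strip l ≠ "") →
    (ls.foldl pvSecStep [(h, b)]).flatMap pvProcSection =
      pvProcSection (h, b) ++ pvRef ls (pvSecFlag h) := by
  induction ls with
  | nil => intros; simp [pvRef]
  | cons raw rest ih =>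
    intro h b hnb
    have hne : PySem.Str.strip raw ≠ "" := hnb raw (by simp)
    have hrest : ∀ l ∈ rest, PySem.Str.strip l ≠ "" := fun l hl => hnb l (by simp [hl])
    simp only [List.foldl_cons, pvSecStep, pvRef, hne, if_false]
    by_cases hhash : PySem.Str.startswith (PySem.Str.strip raw) "#" = true
    · simp only [hhash, if_true, List.singleton_append]
      rw [pvFold_cons rest (h, b) [(some (PySem.Str.strip raw), [])] (by simp)]
      simp only [List.flatMap_cons]
      rw [ih (some (PySem.Str.strip raw)) [] hrest]
      simp [pvProcSection, pvSecFlag, List.append_assoc]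
    · simp only [hhash, Bool.false_eq_true, if_false, pvAddToLast]
      rw [ih h (b ++ [raw]) hrest]
      by_cases hk : pvKeep (pvSecFlag h) raw = true
      · have hk' := hk
        simp only [pvKeep] at hk'
        simp [pvProcSection, List.filter_append, hk, hk', List.append_assoc]
      · have hk' := hk
        simp only [pvKeep, Bool.not_eq_true] at hk'
        simp [pvProcSection, List.filter_append, hk, hk']

theorem pvRef_filter (ls : List String) : ∀ (bs : Bool),
    pvRef (ls.filter (fun l => PySem.Str.strip l ≠ "")) bs = pvRef ls bs := by
  induction ls with
  | nil => intros; rfl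
  | cons raw rest ih =>
    intro bs
    by_cases hne : PySem.Str.strip raw = ""
    · rw [List.filter_cons, if_neg (by simp [hne])]
      simp only [pvRef, hne, if_true]
      exact ih bs
    · rw [List.filter_cons, if_pos (by simp [hne])]
      simp only [pvRef, hne, if_false]
      simp only [decide_not] at ih
      split_ifs <;> simp [ih]

-- ===== VERDICT (by name: the statement is the Claim_ definition above) =====
theorem extract_privacy_boundary_lines_py_spec : Claim_equal_extract_privacy_boundary_lines_py := by
  intro content _
  unfold Spec_extract_privacy_boundary_lines_py extract_privacy_boundary_lines_py
    extract_privacy_boundary_lines_py_alt pvSections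
  have hB : ∀ ms : List String,
      ((ms.filter (fun l => PySem.Str.strip l ≠ "")).foldl pvSecStep [(none, [])]).flatMap
        pvProcSection = pvRef ms false := by
    intro ms
    rw [pvRef_sections _ none [] (by intro l hl; exact (List.mem_filter.mp hl).2 |> (by simpa using ·))]
    simp only [pvProcSection, pvSecFlag]
    simpa using pvRef_filter ms false
  cases hls : PySem.Str.splitlines content with
  | nil => rfl
  | cons first rest =>
    by_cases hfence : PySem.Str.strip first = "---"
    · simp only [pvLoopA, pvStripFrontmatter, hfence, if_true, and_true]
      rw [pvLoopA_fm rest 1 false [] one_ne_zero, pvLoopA_main _ 1 false [] one_ne_zero, hB]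
      simp
    · rw [pvLoopA_zero_step first rest false [] hfence,
        pvLoopA_main _ 1 false [] one_ne_zero, hB]
      simp [pvStripFrontmatter, hfence]
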